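-- pv_equiv track=rewrite | github.com/frantsiles/waybar-toolkit | waybar_toolkit/waybar/config_backend.py | _mask_jsonc_comments
-- ===== SOURCE A (Python) =====
-- def _mask_jsonc_comments(text: str) -> str:
--     """Mask JSONC comments with spaces while preserving text length."""
--     out: list[str] = []
--     in_string = False
--     in_single_comment = False
--     in_multi_comment = False
--     escaped = False
--     i = 0
--     while i < len(text):
--         ch = text[i]
--         nxt = text[i + 1] if i + 1 < len(text) else ""
--
--         if in_single_comment:
--             if ch == "\n":
--                 in_single_comment = False
--                 out.append("\n")
--             else:
--                 out.append(" ")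
--             i += 1
--             continue
--
--         if in_multi_comment:
--             if ch == "*" and nxt == "/":
--                 out.append(" ")
--                 out.append(" ")
--                 in_multi_comment = False
--                 i += 2
--             else:
--                 out.append("\n" if ch == "\n" else " ")
--                 i += 1
--             continue
--
--         if in_string:
--             out.append(ch)
--             if escaped:
--                 escaped = False
--             elif ch == "\\":
--                 escaped = True
--             elif ch == '"':
--                 in_string = False
--             i += 1
--             continue
--
--         if ch == "/" and nxt == "/":
--             out.append(" ")
--             out.append(" ")
--             in_single_comment = True
--             i += 2
--             continue
--
--         if ch == "/" and nxt == "*":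
--             out.append(" ")
--             out.append(" ")
--             in_multi_comment = True
--             i += 2
--             continue
--
--         out.append(ch)
--         if ch == '"':
--             in_string = True
--         i += 1
--
--     return "".join(out)
-- ===== SOURCE B (Python) =====
-- def _mask_jsonc_comments(text: str) -> str:
--     """Chunking lexer: locate whole string/comment tokens and mask comment
--     chunks in one append each, instead of a per-character flag machine."""
--     pieces = []
--     i = 0
--     n = len(text)
--     while i < n:
--         ch = text[i]
--         if ch == '"':
--             j = i + 1
--             while j < n:
--                 c = text[j]
--                 if c == '\\':
--                     j += 2
--                 elif c == '"':
--                     j += 1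
--                     break
--                 else:
--                     j += 1
--             pieces.append(text[i:j])
--             i = j
--         elif ch == '/' and i + 1 < n and text[i + 1] == '/':
--             j = i + 2
--             while j < n and text[j] != '\n':
--                 j += 1
--             pieces.append(' ' * (j - i))
--             i = j
--         elif ch == '/' and i + 1 < n and text[i + 1] == '*':
--             j = i + 2
--             while j < n and not (text[j] == '*' and text[j + 1:j + 2] == '/'):
--                 j += 1
--             j = min(j + 2, n)
--             pieces.append(''.join('\n' if c == '\n' else ' ' for c in text[i:j]))
--             i = j
--         else:
--             pieces.append(ch)
--             i += 1
--     return ''.join(pieces)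
-- ===== Notes on version B (the rewrite author's own statement) =====
-- stated objective: alternative
-- what changed: Replaced the per-character boolean-flag state machine with a chunking lexer that scans each whole string/comment token to its end and appends the token (or its length-preserving space mask) in one piece.
import Mathlib
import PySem

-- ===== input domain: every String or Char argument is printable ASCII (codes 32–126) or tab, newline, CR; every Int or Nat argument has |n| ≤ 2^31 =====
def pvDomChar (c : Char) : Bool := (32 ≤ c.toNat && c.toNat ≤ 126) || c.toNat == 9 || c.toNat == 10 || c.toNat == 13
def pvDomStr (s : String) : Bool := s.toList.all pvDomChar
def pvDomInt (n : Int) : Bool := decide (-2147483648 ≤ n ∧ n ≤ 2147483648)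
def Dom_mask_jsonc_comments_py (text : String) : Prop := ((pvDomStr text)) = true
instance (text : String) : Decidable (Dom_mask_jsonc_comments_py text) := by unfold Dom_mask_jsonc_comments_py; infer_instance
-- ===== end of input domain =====

-- B replaces A's per-character boolean-flag state machine with a chunking lexer that
-- consumes whole string/comment tokens and masks each comment chunk at once (objective: alternative).

-- ===== PORT A =====
-- A's while loop over i with flags (in_string, in_single, in_multi, escaped); nxt lookahead
-- is rest.head?, and 'i += 2' is recursion on rest.tail.
def maskA_loop : List Char → Bool → Bool → Bool → Bool → List Char
  | [], _, _, _, _ => []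
  | ch :: rest, inStr, inS, inM, esc =>
    if inS then
      if ch = '\n' then '\n' :: maskA_loop rest inStr false inM esc
      else ' ' :: maskA_loop rest inStr true inM esc
    else if inM then
      if ch = '*' ∧ rest.head? = some '/' then
        ' ' :: ' ' :: maskA_loop rest.tail inStr inS false esc
      else (if ch = '\n' then '\n' else ' ') :: maskA_loop rest inStr inS true esc
    else if inStr then
      ch :: (if esc then maskA_loop rest true inS inM false
             else if ch = '\\' then maskA_loop rest true inS inM true
             else if ch = '"' then maskA_loop rest false inS inM false
             else maskA_loop rest true inS inM false)
    else if ch = '/' ∧ rest.head? = some '/' then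
      ' ' :: ' ' :: maskA_loop rest.tail inStr true inM esc
    else if ch = '/' ∧ rest.head? = some '*' then
      ' ' :: ' ' :: maskA_loop rest.tail inStr inS true esc
    else
      ch :: (if ch = '"' then maskA_loop rest true inS inM esc
             else maskA_loop rest inStr inS inM esc)
  termination_by s _ _ _ _ => s.length
  decreasing_by
    all_goals simp [List.length_tail]

def mask_jsonc_comments_py (text : String) : String :=
  String.ofList (maskA_loop text.toList false false false false)

-- ===== PORT B =====
-- Source B's inner 'j' loop after an opening quote: consumed chars (incl. closing quote) and rest.
def scanStr : List Char → List Char × List Char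
  | [] => ([], [])
  | c :: rest =>
    if c = '\\' then
      match rest with
      | [] => ([c], [])
      | d :: rest' => ((c :: d :: (scanStr rest').1), (scanStr rest').2)
    else if c = '"' then ([c], rest)
    else ((c :: (scanStr rest).1), (scanStr rest).2)

-- Source B's line-comment 'j' loop: number of chars before the newline (or end), and the rest.
def scanLine : List Char → Nat × List Char
  | [] => (0, [])
  | c :: rest =>
    if c = '\n' then (0, c :: rest)
    else ((scanLine rest).1 + 1, (scanLine rest).2)

-- Source B's block-comment 'j' loop: consumed chars up to and including '*/' (or end), and the rest.
def scanBlock : List Char → List Char × List Char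
  | [] => ([], [])
  | c :: rest =>
    if c = '*' ∧ rest.head? = some '/' then ([c, '/'], rest.tail)
    else ((c :: (scanBlock rest).1), (scanBlock rest).2)

-- Source B's masking join: newline kept, everything else a space.
def maskChunk (s : List Char) : List Char := s.map (fun c => if c = '\n' then '\n' else ' ')

theorem scanStr_len : ∀ s : List Char, (scanStr s).2.length ≤ s.length := by
  intro s
  fun_induction scanStr s <;> simp_all <;> omega

theorem scanLine_len : ∀ s : List Char, (scanLine s).2.length ≤ s.length := by
  intro s
  fun_induction scanLine s <;> simp_all <;> omega

theorem scanBlock_len : ∀ s : List Char, (scanBlock s).2.length ≤ s.length := by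
  intro s
  fun_induction scanBlock s <;> simp_all [List.length_tail] <;> omega

def maskB_loop : List Char → List Char
  | [] => []
  | c :: rest =>
    if c = '"' then c :: (scanStr rest).1 ++ maskB_loop (scanStr rest).2
    else if c = '/' ∧ rest.head? = some '/' then
      ' ' :: ' ' :: (List.replicate (scanLine rest.tail).1 ' ' ++ maskB_loop (scanLine rest.tail).2)
    else if c = '/' ∧ rest.head? = some '*' then
      ' ' :: ' ' :: (maskChunk (scanBlock rest.tail).1 ++ maskB_loop (scanBlock rest.tail).2)
    else c :: maskB_loop rest
  termination_by s => s.length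
  decreasing_by
    · have := scanStr_len rest; simp; omega
    · have := scanLine_len rest.tail; simp [List.length_tail] at *; omega
    · have := scanBlock_len rest.tail; simp [List.length_tail] at *; omega
    · simp

def mask_jsonc_comments_py_alt (text : String) : String :=
  String.ofList (maskB_loop text.toList)

-- ===== PRECONDITION & SPEC =====
def Spec_mask_jsonc_comments_py (text : String) (out : String) : Prop := out = mask_jsonc_comments_py_alt text
instance (text : String) (out : String) : Decidable (Spec_mask_jsonc_comments_py text out) := by unfold Spec_mask_jsonc_comments_py; infer_instance

-- ===== CLAIM (what is proved, stated in full; the proofs are below) =====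
def Claim_equal_mask_jsonc_comments_py : Prop := ∀ (text : String), Dom_mask_jsonc_comments_py text → Spec_mask_jsonc_comments_py text (mask_jsonc_comments_py text)

-- ===== LEMMAS AND PROOFS =====

-- A's in_string mode produces the string body verbatim, then resumes in normal mode.
theorem maskA_string : ∀ s : List Char,
    maskA_loop s true false false false
      = (scanStr s).1 ++ maskA_loop (scanStr s).2 false false false false := by
  intro s
  fun_induction scanStr s <;> simp_all [maskA_loop]

-- A's in_single_comment mode produces spaces up to the newline, then resumes in normal mode.
theorem maskA_line : ∀ s : List Char,
    maskA_loop s false true false false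
      = List.replicate (scanLine s).1 ' ' ++ maskA_loop (scanLine s).2 false false false false := by
  intro s
  fun_induction scanLine s <;> simp_all [maskA_loop, List.replicate_succ]

-- A's in_multi_comment mode produces the masked chunk, then resumes in normal mode.
theorem maskA_block : ∀ s : List Char,
    maskA_loop s false false true false
      = maskChunk (scanBlock s).1 ++ maskA_loop (scanBlock s).2 false false false false := by
  intro s
  fun_induction scanBlock s <;> simp_all [maskA_loop, maskChunk]

theorem maskA_eq_maskB : ∀ s : List Char, maskA_loop s false false false false = maskB_loop s := by
  intro s
  fun_induction maskB_loop s <;>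
    simp_all [maskA_loop, maskA_string, maskA_line, maskA_block] <;>
    (split_ifs with h1 h2 <;> simp_all)

-- ===== VERDICT (by name: the statement is the Claim_ definition above) =====
theorem mask_jsonc_comments_py_spec : Claim_equal_mask_jsonc_comments_py := by
  intro text _
  unfold Spec_mask_jsonc_comments_py mask_jsonc_comments_py mask_jsonc_comments_py_alt
  rw [maskA_eq_maskB]
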